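-- pv_equiv track=rewrite | github.com/jjustin/advent-of-code | 2022/25/1.py | solve
-- ===== SOURCE A (Python) =====
-- def solve(input: str):
--     input = input.strip()
--     res = 0
--
--     for line in input.split('\n'):
--         if line == "":
--             continue
--
--         res += snafuToDec(line)
--
--     return decToSnafu(res)
--
-- SNAFU_DEC_MAPPING = {
--     "0": 0,
--     "1": 1,
--     "2": 2,
--     "=": -2,
--     "-": -1,
-- }
--
-- def snafuToDec(n):
--     return 5 * snafuToDec(n[:-1]) + SNAFU_DEC_MAPPING[n[-1]] if n else 0
--
-- def decToSnafu(n):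
--     if n > 0:
--         return decToSnafu((n+2)//5) + "012=-"[n % 5]
--     return ""
-- ===== SOURCE B (Python) =====
-- SNAFU_DIGITS = {"0": 0, "1": 1, "2": 2, "=": -2, "-": -1}
--
-- def solve(input: str):
--     total = 0
--     power = 1
--     for c in reversed(input.strip()):
--         if c == '\n':
--             power = 1
--         else:
--             total += SNAFU_DIGITS[c] * power
--             power *= 5
--     digits = []
--     while total > 0:
--         digits.append("=-012"[(total + 2) % 5])
--         total = (total + 2) // 5
--     return ''.join(reversed(digits))
-- ===== Notes on version B (the rewrite author's own statement) =====
-- stated objective: alternative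
-- what changed: B drops split('\n') and both recursive helpers: one reverse scan over the whole stripped string accumulates digit*power with the power reset at newlines (so lines are never materialised), and the SNAFU output is built least-significant-digit first into a list with the shifted remainder (n+2)%5 indexing "=-012", reversed once at the end.
import Mathlib
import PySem

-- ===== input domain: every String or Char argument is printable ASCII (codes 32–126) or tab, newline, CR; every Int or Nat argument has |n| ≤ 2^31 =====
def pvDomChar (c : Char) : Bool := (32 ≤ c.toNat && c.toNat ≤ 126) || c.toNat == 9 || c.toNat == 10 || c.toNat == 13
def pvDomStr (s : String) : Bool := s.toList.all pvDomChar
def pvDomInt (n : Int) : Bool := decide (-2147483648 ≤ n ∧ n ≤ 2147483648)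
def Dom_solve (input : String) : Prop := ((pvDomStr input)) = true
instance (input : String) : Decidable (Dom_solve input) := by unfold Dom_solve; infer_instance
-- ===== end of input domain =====

-- B replaces A's split('\n') + two self-recursive helpers by a single reverse scan over the
-- whole stripped string (digit*power accumulation, power reset at newlines — lines are never
-- materialised) and a digit loop that appends least-significant first and reverses once.

-- ===== PORT A =====
-- SNAFU_DEC_MAPPING[c]; a char outside the dict raises KeyError, excluded by Pre_solve (default 0 never reached there)
def snafuMapA (c : Char) : Int :=
  if c = '0' then 0 else if c = '1' then 1 else if c = '2' then 2
  else if c = '=' then -2 else if c = '-' then -1 else 0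

-- snafuToDec: '5 * snafuToDec(n[:-1]) + MAP[n[-1]] if n else 0', realized as structural
-- recursion over the REVERSED char list (head = n[-1], tail = reverse of n[:-1]) — exact
def snafuToDecA : List Char → Int
  | [] => 0
  | c :: rest => 5 * snafuToDecA rest + snafuMapA c

-- "012=-"[i] ; i = n % 5 is always in range, so the default is never reached
def digitA (i : Int) : Char := PySem.List.pyGetD "012=-".toList i ' '

def decToSnafuA (n : Int) : List Char :=
  if _h : 0 < n then
    decToSnafuA (PySem.Int.floordiv (n + 2) 5) ++ [digitA (PySem.Int.mod n 5)]
  else []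
termination_by n.toNat
decreasing_by rw [PySem.Int.floordiv_eq_ediv_of_pos (by omega : (0:Int) < 5)]; omega

def solve (input : String) : String :=
  let lines := PySem.Chars.splitOn (PySem.Str.strip input).toList ['\n']
  let res := lines.foldl (fun r line => if line = [] then r else r + snafuToDecA line.reverse) 0
  String.ofList (decToSnafuA res)

-- ===== PORT B =====
-- SNAFU_DIGITS dict; a missing key raises KeyError in Python, excluded by Pre_solve
def snafuDigitsB : PySem.Dict Char Int :=
  ((((PySem.Dict.empty.insert '0' 0).insert '1' 1).insert '2' 2).insert '=' (-2)).insert '-' (-1)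

-- loop body of 'for c in reversed(input.strip())': state = (total, power)
def scanStepB (tp : Int × Int) (c : Char) : Int × Int :=
  if c = '\n' then (tp.1, 1)
  else (tp.1 + snafuDigitsB.getD c 0 * tp.2, tp.2 * 5)

-- while total > 0: digits.append("=-012"[(total+2)%5]); total = (total+2)//5
def digitsLoopB (total : Int) (digits : List Char) : List Char :=
  if _h : 0 < total then
    digitsLoopB (PySem.Int.floordiv (total + 2) 5)
      (digits ++ [PySem.List.pyGetD "=-012".toList (PySem.Int.mod (total + 2) 5) ' '])
  else digits
termination_by total.toNat
decreasing_by rw [PySem.Int.floordiv_eq_ediv_of_pos (by omega : (0:Int) < 5)]; omega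

def solve_alt (input : String) : String :=
  let tp := ((PySem.Str.strip input).toList.reverse).foldl scanStepB (0, 1)
  String.ofList (digitsLoopB tp.1 []).reverse

-- ===== PRECONDITION & SPEC =====
-- Pre_ excludes exactly the inputs on which Python A raises KeyError: a character of the
-- stripped input that is neither a SNAFU digit ('0','1','2','=','-') nor the line separator.
def Pre_solve (input : String) : Prop :=
  (PySem.Str.strip input).toList.all (fun c => c ∈ ['0', '1', '2', '=', '-', '\n']) = true
instance (input : String) : Decidable (Pre_solve input) := by unfold Pre_solve; infer_instance

def pvWitness_solve : String := "1=\n12"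

def Spec_solve (input : String) (out : String) : Prop := out = solve_alt input
instance (input : String) (out : String) : Decidable (Spec_solve input out) := by unfold Spec_solve; infer_instance

-- ===== CLAIM (what is proved, stated in full; the proofs are below) =====
def Claim_equal_solve : Prop := ∀ (input : String), Dom_solve input → Pre_solve input → Spec_solve input (solve input)

-- ===== LEMMAS AND PROOFS =====

-- clean recursive description of input.split('\n') on char lists
def splitNl : List Char → List (List Char)
  | [] => [[]]
  | c :: rest =>
      if c = '\n' then [] :: splitNl rest
      else match splitNl rest with
        | [] => [[c]]
        | h :: t => (c :: h) :: t

def prependFirst (p : List Char) : List (List Char) → List (List Char)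
  | [] => [p]
  | h :: t => (p ++ h) :: t

theorem splitNl_ne_nil (l : List Char) : splitNl l ≠ [] := by
  cases l with
  | nil => simp [splitNl]
  | cons c rest =>
      simp only [splitNl]
      split
      · simp
      · split <;> simp

theorem go_eq (l : List Char) : ∀ (fuel : Nat) (cur : List Char) (acc : List (List Char)),
    l.length < fuel →
    PySem.Chars.splitOn.go ['\n'] fuel l cur acc
      = acc.reverse ++ prependFirst cur.reverse (splitNl l) := by
  induction l with
  | nil =>
      intro fuel cur acc h
      match fuel with
      | fuel + 1 => simp [PySem.Chars.splitOn.go, splitNl, prependFirst]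
  | cons c rest ih =>
      intro fuel cur acc h
      match fuel with
      | fuel + 1 =>
        rw [PySem.Chars.splitOn.go]
        by_cases hc : c = '\n'
        · subst hc
          simp only [List.isPrefixOf, BEq.rfl, Bool.true_and, if_pos,
            List.length_singleton, List.drop_succ_cons, List.drop_zero]
          rw [ih fuel [] (cur.reverse :: acc) (by simpa using Nat.lt_of_succ_lt_succ h)]
          simp only [splitNl, prependFirst, List.reverse_cons, List.reverse_nil,
            List.nil_append, List.append_assoc]
          cases hs : splitNl rest with
          | nil => exact absurd hs (splitNl_ne_nil rest)
          | cons h0 t => simp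
        · have hb : (['\n'].isPrefixOf (c :: rest)) = false := by
            simp [List.isPrefixOf]
            exact fun hcc => hc hcc.symm
          rw [hb]
          simp only [Bool.false_eq_true, if_false]
          rw [ih fuel (c :: cur) acc (Nat.lt_of_succ_lt_succ h)]
          simp only [splitNl, if_neg hc, List.reverse_cons]
          cases hs : splitNl rest with
          | nil => exact absurd hs (splitNl_ne_nil rest)
          | cons h0 t => simp [prependFirst]

theorem splitOn_nl (s : List Char) : PySem.Chars.splitOn s ['\n'] = splitNl s := by
  rw [PySem.Chars.splitOn, go_eq s (s.length + 1) [] [] (Nat.lt_succ_self _)]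
  cases hs : splitNl s with
  | nil => exact absurd hs (splitNl_ne_nil s)
  | cons h0 t => simp [prependFirst]

-- B's dict lookup agrees with A's mapping on every char (both default to 0 off the keys)
theorem dictB_eq_mapA (c : Char) : snafuDigitsB.getD c 0 = snafuMapA c := by
  by_cases h0 : c = '0'
  · subst h0; decide
  by_cases h1 : c = '1'
  · subst h1; decide
  by_cases h2 : c = '2'
  · subst h2; decide
  by_cases h3 : c = '='
  · subst h3; decide
  by_cases h4 : c = '-'
  · subst h4; decide
  · simp only [snafuMapA, if_neg h0, if_neg h1, if_neg h2, if_neg h3, if_neg h4]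
    rw [snafuDigitsB, PySem.Dict.getD_insert_of_ne _ _ _ h4,
      PySem.Dict.getD_insert_of_ne _ _ _ h3,
      PySem.Dict.getD_insert_of_ne _ _ _ h2,
      PySem.Dict.getD_insert_of_ne _ _ _ h1,
      PySem.Dict.getD_insert_of_ne _ _ _ h0]
    rfl

theorem snafuToDecA_append (xs : List Char) (c : Char) :
    snafuToDecA (xs ++ [c]) = snafuMapA c * 5 ^ xs.length + snafuToDecA xs := by
  induction xs with
  | nil => simp [snafuToDecA]
  | cons x xs ih => simp [snafuToDecA, ih]; ring

-- A's per-line fold is the sum of the line values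
theorem foldlA_sum (ls : List (List Char)) (a : Int) :
    ls.foldl (fun r line => if line = [] then r else r + snafuToDecA line.reverse) a
      = a + (ls.map (fun line => snafuToDecA line.reverse)).sum := by
  induction ls generalizing a with
  | nil => simp
  | cons line rest ih =>
      simp only [List.foldl_cons, List.map_cons, List.sum_cons, ih]
      by_cases h : line = []
      · subst h; simp [snafuToDecA]
      · rw [if_neg h]; ring

-- B's reverse scan computes (sum of line values, 5 ^ length of the first line)
theorem scanB_spec (s : List Char) :
    s.foldr (fun c tp => scanStepB tp c) ((0 : Int), (1 : Int))
      = (((splitNl s).map (fun line => snafuToDecA line.reverse)).sum,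
         5 ^ ((splitNl s).headD []).length) := by
  induction s with
  | nil => simp [splitNl, snafuToDecA]
  | cons c rest ih =>
      simp only [List.foldr_cons, ih]
      by_cases hc : c = '\n'
      · subst hc
        simp [scanStepB, splitNl, snafuToDecA]
      · cases hs : splitNl rest with
        | nil => exact absurd hs (splitNl_ne_nil rest)
        | cons h0 t =>
            simp only [scanStepB, if_neg hc, splitNl, hs]
            simp only [List.map_cons, List.sum_cons, List.headD_cons, List.reverse_cons,
              snafuToDecA_append, List.length_reverse, List.length_cons, dictB_eq_mapA]
            refine Prod.ext (by ring) (by ring)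

-- the two digit tables agree: "=-012"[(n+2)%5] = "012=-"[n%5]
theorem digit_shift (n : Int) :
    PySem.List.pyGetD "=-012".toList (PySem.Int.mod (n + 2) 5) ' '
      = digitA (PySem.Int.mod n 5) := by
  rw [digitA, PySem.Int.mod_eq_emod_of_pos (by omega : (0:Int) < 5),
    PySem.Int.mod_eq_emod_of_pos (by omega : (0:Int) < 5)]
  have hb : 0 ≤ n % 5 ∧ n % 5 < 5 := ⟨Int.emod_nonneg n (by omega), Int.emod_lt_of_pos n (by omega)⟩
  obtain ⟨hl, hr5⟩ := hb
  have hsh : (n + 2) % 5 = (n % 5 + 2) % 5 := by omega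
  rw [hsh]
  set r := n % 5 with hrdef
  interval_cases r <;> decide

-- B's append-then-reverse digit loop produces A's recursion, reversed
theorem digitsLoopB_eq (n : Int) (ds : List Char) :
    digitsLoopB n ds = ds ++ (decToSnafuA n).reverse := by
  induction n, ds using digitsLoopB.induct with
  | case1 n ds h ih =>
      rw [digitsLoopB, decToSnafuA, dif_pos h, dif_pos h, ih, digit_shift]
      simp
  | case2 n ds h =>
      rw [digitsLoopB, decToSnafuA, dif_neg h, dif_neg h]
      simp

-- ===== VERDICT (by name: the statement is the Claim_ definition above) =====
theorem solve_spec : Claim_equal_solve := by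
  intro input _ _
  show solve input = solve_alt input
  rw [solve, solve_alt]
  simp only [splitOn_nl, foldlA_sum, List.foldl_reverse, scanB_spec, digitsLoopB_eq,
    List.nil_append, List.reverse_reverse, zero_add]
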